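-- pv_equiv track=rewrite | github.com/Divyaakula28/semresults_update | twotwo/views.py | apf
-- ===== SOURCE A (Python) =====
-- def apf(Subcode,reg,Htno,ht,Grade):
-- 	failst,abslst,passlst=0,0,0
-- 	gg=['O','S','A','B','C','D']
-- 	for i in range(len(Subcode)):
-- 		if reg==Subcode[i] and str(Htno[i])[6:-2]==ht:
-- 			if Grade[i]=='F':
-- 				failst+=1
-- 			elif Grade[i]=='ABSENT' and str(Htno[i])[6:-2]==ht:
-- 				abslst+=1
-- 			elif Grade[i] in gg and str(Htno[i])[6:-2]==ht:
-- 				passlst+=1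
-- 	color1,color2,color3="#FF4500","#00FF7F","#0000FF"
-- 	return(reg,failst,passlst,abslst,color1,color2,color3)
-- ===== SOURCE B (Python) =====
-- def apf(Subcode, reg, Htno, ht, Grade):
--     # phase 1: collect the grades of matching rows (index-based, as lengths may differ)
--     grades = [Grade[i] for i in range(len(Subcode))
--               if reg == Subcode[i] and str(Htno[i])[6:-2] == ht]
--     # phase 2: categorical tally with a dict counter
--     cnt = {}
--     for g in grades:
--         cnt[g] = cnt.get(g, 0) + 1
--     failst = cnt.get('F', 0)
--     abslst = cnt.get('ABSENT', 0)
--     passlst = sum(cnt.get(g, 0) for g in ['O', 'S', 'A', 'B', 'C', 'D'])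
--     return (reg, failst, passlst, abslst, "#FF4500", "#00FF7F", "#0000FF")
-- ===== Notes on version B (the rewrite author's own statement) =====
-- stated objective: alternative
-- what changed: A's single fused loop with branch-per-category counters is replaced by a two-phase decomposition: a filter comprehension collecting the grades of matching rows, then a dict-based categorical tally (counter) from which fail/absent/pass counts are read off.
import Mathlib
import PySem

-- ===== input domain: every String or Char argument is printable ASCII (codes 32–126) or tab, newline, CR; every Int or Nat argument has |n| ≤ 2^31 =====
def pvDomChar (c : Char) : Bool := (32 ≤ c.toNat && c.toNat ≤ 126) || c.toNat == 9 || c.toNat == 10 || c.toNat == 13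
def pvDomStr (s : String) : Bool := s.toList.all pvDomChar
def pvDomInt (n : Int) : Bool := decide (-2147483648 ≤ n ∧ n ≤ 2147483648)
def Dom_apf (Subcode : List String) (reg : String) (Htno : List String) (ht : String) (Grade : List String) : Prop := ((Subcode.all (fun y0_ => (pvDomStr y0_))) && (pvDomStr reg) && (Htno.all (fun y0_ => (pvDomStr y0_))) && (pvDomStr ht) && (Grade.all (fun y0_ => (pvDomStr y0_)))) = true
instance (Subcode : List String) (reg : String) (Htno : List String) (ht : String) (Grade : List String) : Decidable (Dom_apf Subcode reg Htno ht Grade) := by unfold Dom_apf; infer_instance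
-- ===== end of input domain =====

-- B replaces A's fused branch-counting loop by a filter phase followed by a dict-counter tally; same O(n) cost, different decomposition.


-- shared helper: str(x)[6:-2] of a ticket number (both Pythons compute this same expression)
def pvHt (s : String) : String := PySem.Str.slice s (some 6) (some (-2))

-- ===== PORT A =====
def apf (Subcode : List String) (reg : String) (Htno : List String) (ht : String) (Grade : List String) : String × Int × Int × Int × String × String × String :=
  let gg : List String := ["O", "S", "A", "B", "C", "D"]
  -- state (failst, abslst, passlst), updated exactly as A's branch ladder does
  let st : Int × Int × Int :=
    (List.range Subcode.length).foldl
      (fun st i =>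
        if reg == Subcode.getD i "" && pvHt (Htno.getD i "") == ht then
          if Grade.getD i "" == "F" then (st.1 + 1, st.2.1, st.2.2)
          else if Grade.getD i "" == "ABSENT" && pvHt (Htno.getD i "") == ht then (st.1, st.2.1 + 1, st.2.2)
          else if gg.contains (Grade.getD i "") && pvHt (Htno.getD i "") == ht then (st.1, st.2.1, st.2.2 + 1)
          else st
        else st)
      (0, 0, 0)
  (reg, st.1, st.2.2, st.2.1, "#FF4500", "#00FF7F", "#0000FF")

-- ===== PORT B =====
def apf_alt (Subcode : List String) (reg : String) (Htno : List String) (ht : String) (Grade : List String) : String × Int × Int × Int × String × String × String :=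
  let grades : List String :=
    (List.range Subcode.length).filterMap
      (fun i => if reg == Subcode.getD i "" && pvHt (Htno.getD i "") == ht then some (Grade.getD i "") else none)
  let cnt : PySem.Dict String Int := PySem.Dict.counter grades
  let failst : Int := cnt.getD "F" 0
  let abslst : Int := cnt.getD "ABSENT" 0
  let passlst : Int := ((["O", "S", "A", "B", "C", "D"] : List String).map (fun g => cnt.getD g 0)).sum
  (reg, failst, passlst, abslst, "#FF4500", "#00FF7F", "#0000FF")

-- ===== PRECONDITION & SPEC =====
-- Pre_ excludes exactly the inputs where Python A raises IndexError: an index whose subcode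
-- matches but lies beyond Htno, or a fully matching row beyond Grade.
def Pre_apf (Subcode : List String) (reg : String) (Htno : List String) (ht : String) (Grade : List String) : Prop :=
  ∀ i < Subcode.length, (reg == Subcode.getD i "") = true →
    i < Htno.length ∧ ((pvHt (Htno.getD i "") == ht) = true → i < Grade.length)
instance (Subcode : List String) (reg : String) (Htno : List String) (ht : String) (Grade : List String) : Decidable (Pre_apf Subcode reg Htno ht Grade) := by unfold Pre_apf; infer_instance
def pvWitness_apf : List String × String × List String × String × List String :=
  (["MA101"], "MA101", ["12345678XY"], "78", ["F"])
def Spec_apf (Subcode : List String) (reg : String) (Htno : List String) (ht : String) (Grade : List String) (out : String × Int × Int × Int × String × String × String) : Prop := out = apf_alt Subcode reg Htno ht Grade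
instance (Subcode : List String) (reg : String) (Htno : List String) (ht : String) (Grade : List String) (out : String × Int × Int × Int × String × String × String) : Decidable (Spec_apf Subcode reg Htno ht Grade out) := by unfold Spec_apf; infer_instance

-- ===== CLAIM (what is proved, stated in full; the proofs are below) =====
def Claim_equal_apf : Prop := ∀ (Subcode : List String) (reg : String) (Htno : List String) (ht : String) (Grade : List String), Dom_apf Subcode reg Htno ht Grade → Pre_apf Subcode reg Htno ht Grade → Spec_apf Subcode reg Htno ht Grade (apf Subcode reg Htno ht Grade)

-- ===== LEMMAS AND PROOFS =====

-- proof-only helper: A's branch ladder as a function of the grade alone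
-- (legitimate because inside a matching row the repeated ht test is already true)
def pvStep (st : Int × Int × Int) (g : String) : Int × Int × Int :=
  if g == "F" then (st.1 + 1, st.2.1, st.2.2)
  else if g == "ABSENT" then (st.1, st.2.1 + 1, st.2.2)
  else if (["O", "S", "A", "B", "C", "D"] : List String).contains g then (st.1, st.2.1, st.2.2 + 1)
  else st

-- proof-only helper: the comprehension's per-index pick
def pvPick (Subcode : List String) (reg : String) (Htno : List String) (ht : String) (Grade : List String) (i : Nat) : Option String :=
  if reg == Subcode.getD i "" && pvHt (Htno.getD i "") == ht then some (Grade.getD i "") else none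

-- A's loop body equals "look up the picked grade, then pvStep"
theorem pvBody (Subcode : List String) (reg : String) (Htno : List String) (ht : String) (Grade : List String) :
    (fun (st : Int × Int × Int) i =>
        if reg == Subcode.getD i "" && pvHt (Htno.getD i "") == ht then
          if Grade.getD i "" == "F" then (st.1 + 1, st.2.1, st.2.2)
          else if Grade.getD i "" == "ABSENT" && pvHt (Htno.getD i "") == ht then (st.1, st.2.1 + 1, st.2.2)
          else if (["O", "S", "A", "B", "C", "D"] : List String).contains (Grade.getD i "") && pvHt (Htno.getD i "") == ht then (st.1, st.2.1, st.2.2 + 1)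
          else st
        else st)
    = (fun (st : Int × Int × Int) (i : Nat) =>
        match pvPick Subcode reg Htno ht Grade i with
        | some g => pvStep st g
        | none => st) := by
  funext st i
  unfold pvPick
  by_cases hh : (pvHt (Htno.getD i "") == ht) = true
  · simp only [hh, Bool.and_true, pvStep]
    by_cases hs : reg = Subcode.getD i ""
    all_goals simp only [List.getD_eq_getElem?_getD] at hs
    · simp [hs]
    · simp [hs]
  · simp only [Bool.and_eq_true, hh, and_false, if_false, Bool.false_eq_true]

-- the indexed loop over pvStep-of-pick is the fold of pvStep over the filtered grades
theorem pvRangeFold (pick : Nat → Option String) (L : List Nat) (st : Int × Int × Int) :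
    L.foldl (fun st i =>
        match pick i with
        | some g => pvStep st g
        | none => st) st
    = (L.filterMap pick).foldl pvStep st := by
  induction L generalizing st with
  | nil => rfl
  | cons i L ih =>
    rw [List.foldl_cons, List.filterMap_cons]
    cases h : pick i <;> simp [h, ih]

-- folding pvStep over the grades list adds the three categorical tallies
theorem pvFold (G : List String) (f a p : Int) :
    G.foldl pvStep (f, a, p)
    = (f + (G.count "F" : Int), a + (G.count "ABSENT" : Int),
       p + ((G.count "O" + G.count "S" + G.count "A" + G.count "B" + G.count "C" + G.count "D" : Nat) : Int)) := by
  induction G generalizing f a p with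
  | nil => simp
  | cons g G ih =>
    rw [List.foldl_cons]
    by_cases hF : g = "F"
    · subst hF
      rw [show pvStep (f, a, p) "F" = (f + 1, a, p) from by simp [pvStep]]
      rw [ih]
      simp [List.count_cons, Prod.ext_iff]
      push_cast; omega
    · by_cases hA : g = "ABSENT"
      · subst hA
        rw [show pvStep (f, a, p) "ABSENT" = (f, a + 1, p) from by simp [pvStep]]
        rw [ih]
        simp [List.count_cons, Prod.ext_iff]
        push_cast; omega
      · by_cases hG : ((["O", "S", "A", "B", "C", "D"] : List String).contains g) = true
        · have hm : g ∈ (["O", "S", "A", "B", "C", "D"] : List String) := List.contains_iff_mem.mp hG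
          fin_cases hm <;>
            · simp [pvStep, ih, List.count_cons, Prod.ext_iff]
              push_cast; omega
        · have hm : ¬ g ∈ (["O", "S", "A", "B", "C", "D"] : List String) :=
            fun h => hG (List.contains_iff_mem.mpr h)
          simp only [List.mem_cons, List.not_mem_nil, or_false, not_or] at hm
          obtain ⟨h1, h2, h3, h4, h5, h6⟩ := hm
          rw [show pvStep (f, a, p) g = (f, a, p) from by
            simp [pvStep, hF, hA, h1, h2, h3, h4, h5, h6]]
          rw [ih]
          simp [List.count_cons, Prod.ext_iff, hF, hA, h1, h2, h3, h4, h5, h6,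
            Ne.symm hF, Ne.symm hA, Ne.symm h1, Ne.symm h2, Ne.symm h3, Ne.symm h4,
            Ne.symm h5, Ne.symm h6]

-- ===== VERDICT (by name: the statement is the Claim_ definition above) =====
theorem apf_spec : Claim_equal_apf := by
  intro Subcode reg Htno ht Grade _ _
  unfold Spec_apf
  simp only [apf, apf_alt]
  rw [pvBody, pvRangeFold (pvPick Subcode reg Htno ht Grade)]
  have hpick : pvPick Subcode reg Htno ht Grade
      = (fun i => if reg == Subcode.getD i "" && pvHt (Htno.getD i "") == ht then some (Grade.getD i "") else none) := rfl
  rw [hpick, pvFold]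
  simp only [List.map_cons, List.map_nil, List.sum_cons, List.sum_nil, PySem.Dict.getD_counter,
    Prod.mk.injEq, eq_self_iff_true, true_and, and_true]
  refine ⟨by push_cast; omega, by push_cast; omega, by push_cast; omega⟩
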